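-- pv_equiv track=rewrite | github.com/pazbenitzhak/Computer-Science-101-Assignments | ex 5/hw5_315328963.py | prefix_suffix_overlap
-- ===== SOURCE A (Python) =====
-- def prefix_suffix_overlap(lst, k):
--     res = []
--     for i in range(len(lst)):
--         for j in range(len(lst)):
--             if i == j:
--                 continue
--             if lst[i][:k]== lst[j][-k:]:
--                 res.append((i,j))
--     return res
-- ===== SOURCE B (Python) =====
-- def prefix_suffix_overlap(lst, k):
--     # Group indices by their k-suffix once, then look up each k-prefix.
--     buckets = {}
--     for j, w in enumerate(lst):
--         buckets.setdefault(w[-k:], []).append(j)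
--     res = []
--     for i, w in enumerate(lst):
--         for j in buckets.get(w[:k], []):
--             if j != i:
--                 res.append((i, j))
--     return res
-- ===== Notes on version B (the rewrite author's own statement) =====
-- stated objective: alternative
-- what changed: B builds a dict mapping each k-suffix to the ordered list of indices bearing it in one pass, then answers each k-prefix with one lookup, replacing A's all-pairs double scan of string comparisons.
import Mathlib
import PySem

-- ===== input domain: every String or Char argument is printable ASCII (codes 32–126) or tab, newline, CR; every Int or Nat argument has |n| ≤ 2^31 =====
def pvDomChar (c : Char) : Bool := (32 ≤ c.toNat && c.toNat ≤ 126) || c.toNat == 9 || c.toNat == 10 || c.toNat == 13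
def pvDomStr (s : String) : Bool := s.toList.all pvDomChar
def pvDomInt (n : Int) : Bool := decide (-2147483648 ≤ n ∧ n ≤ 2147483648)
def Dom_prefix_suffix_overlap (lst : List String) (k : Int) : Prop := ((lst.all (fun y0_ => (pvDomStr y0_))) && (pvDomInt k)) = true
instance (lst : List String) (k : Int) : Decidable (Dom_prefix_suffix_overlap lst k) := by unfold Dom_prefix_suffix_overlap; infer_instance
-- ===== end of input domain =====

-- B groups the indices by their k-suffix in one dict pass and looks each k-prefix up,
-- replacing A's all-pairs comparison scan (objective: alternative).

-- ===== PORT A =====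
def prefix_suffix_overlap (lst : List String) (k : Int) : List (Int × Int) :=
  (PySem.List.pyRange 0 (lst.length : Int)).foldl (fun res i =>
    (PySem.List.pyRange 0 (lst.length : Int)).foldl (fun res j =>
      if i == j then res
      else if PySem.Str.slice (PySem.List.pyGetD lst i "") none (some k)
              == PySem.Str.slice (PySem.List.pyGetD lst j "") (some (-k)) none
           then res ++ [(i, j)] else res) res) []

-- ===== PORT B =====
def prefix_suffix_overlap_alt (lst : List String) (k : Int) : List (Int × Int) :=
  let buckets : PySem.Dict String (List Int) :=
    (PySem.List.enumerate lst).foldl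
      (fun d p => d.modify (PySem.Str.slice p.2 (some (-k)) none) [] (fun js => js ++ [p.1]))
      PySem.Dict.empty
  (PySem.List.enumerate lst).foldl (fun res p =>
    (buckets.getD (PySem.Str.slice p.2 none (some k)) []).foldl
      (fun res j => if j != p.1 then res ++ [(p.1, j)] else res) res) []

-- ===== PRECONDITION & SPEC =====
def Spec_prefix_suffix_overlap (lst : List String) (k : Int) (out : List (Int × Int)) : Prop := out = prefix_suffix_overlap_alt lst k
instance (lst : List String) (k : Int) (out : List (Int × Int)) : Decidable (Spec_prefix_suffix_overlap lst k out) := by unfold Spec_prefix_suffix_overlap; infer_instance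

-- ===== CLAIM (what is proved, stated in full; the proofs are below) =====
def Claim_equal_prefix_suffix_overlap : Prop := ∀ (lst : List String) (k : Int), Dom_prefix_suffix_overlap lst k → Spec_prefix_suffix_overlap lst k (prefix_suffix_overlap lst k)

-- ===== LEMMAS AND PROOFS =====

-- enumerate over a list of strings, written as a map over the index range
lemma pso_enum_eq (lst : List String) (s : Int) :
    PySem.List.enumerate lst s
      = (List.range lst.length).map (fun j : Nat => (s + (j : Int), lst.getD j "")) := by
  induction lst generalizing s with
  | nil => simp [PySem.List.enumerate]
  | cons x t ih =>
      simp [PySem.List.enumerate, ih, List.range_succ_eq_map, List.map_map, Function.comp]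
      intro a _
      ring

-- the common closed form both ports are reduced to
def psoSpec (lst : List String) (k : Int) : List (Int × Int) :=
  (List.range lst.length).flatMap (fun (a : Nat) =>
    ((List.range lst.length).filter (fun (b : Nat) =>
        (!(Int.ofNat a == Int.ofNat b)) &&
        (PySem.Str.slice (lst.getD a "") none (some k)
          == PySem.Str.slice (lst.getD b "") (some (-k)) none))).map
      (fun (b : Nat) => (Int.ofNat a, Int.ofNat b)))

lemma pso_a_eq (lst : List String) (k : Int) :
    prefix_suffix_overlap lst k = psoSpec lst k := by
  unfold prefix_suffix_overlap psoSpec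
  rw [PySem.List.pyRange_zero_natCast, List.foldl_map]
  have hinner : ∀ (a : Nat) (res : List (Int × Int)),
      (List.map (fun m : Nat => (m : Int)) (List.range lst.length)).foldl
        (fun res j => if (↑a : Int) == j then res
          else if PySem.Str.slice (PySem.List.pyGetD lst (↑a : Int) "") none (some k)
                  == PySem.Str.slice (PySem.List.pyGetD lst j "") (some (-k)) none
               then res ++ [((↑a : Int), j)] else res) res
      = res ++ ((List.range lst.length).filter (fun (b : Nat) =>
            (!(Int.ofNat a == Int.ofNat b)) &&
            (PySem.Str.slice (lst.getD a "") none (some k)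
              == PySem.Str.slice (lst.getD b "") (some (-k)) none))).map
          (fun (b : Nat) => (Int.ofNat a, Int.ofNat b)) := by
    intro a res
    rw [List.foldl_map]
    have hbody : (fun (res : List (Int × Int)) (b : Nat) =>
        if (↑a : Int) == (↑b : Int) then res
        else if PySem.Str.slice (PySem.List.pyGetD lst (↑a : Int) "") none (some k)
                == PySem.Str.slice (PySem.List.pyGetD lst (↑b : Int) "") (some (-k)) none
             then res ++ [((↑a : Int), (↑b : Int))] else res)
        = fun (res : List (Int × Int)) (b : Nat) =>
          if (!(Int.ofNat a == Int.ofNat b)) &&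
             (PySem.Str.slice (lst.getD a "") none (some k)
               == PySem.Str.slice (lst.getD b "") (some (-k)) none)
          then res ++ [((↑a : Int), (↑b : Int))] else res := by
      funext res b
      by_cases h : (↑a : Int) == (↑b : Int) <;>
        simp [h, PySem.List.pyGetD_natCast, Int.ofNat_eq_natCast]
    rw [hbody, PySem.List.foldl_append_if]
    simp [Int.ofNat_eq_natCast]
  simp only [hinner]
  rw [PySem.List.foldl_append_eq_flatMap]
  simp

lemma pso_b_eq (lst : List String) (k : Int) :
    prefix_suffix_overlap_alt lst k = psoSpec lst k := by
  unfold prefix_suffix_overlap_alt psoSpec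
  rw [pso_enum_eq lst 0]
  simp only [zero_add]
  -- characterise the buckets: the bucket of c holds, in order, the indices whose k-suffix is c
  have hb : ∀ c : String,
      (((List.range lst.length).map (fun j : Nat => ((j : Int), lst.getD j ""))).foldl
        (fun d p => d.modify (PySem.Str.slice p.2 (some (-k)) none) [] (fun js => js ++ [p.1]))
        PySem.Dict.empty).getD c []
      = ((List.range lst.length).filter (fun (b : Nat) =>
            PySem.Str.slice (lst.getD b "") (some (-k)) none == c)).map
          (fun (b : Nat) => Int.ofNat b) := by
    intro c
    rw [show ((List.range lst.length).map (fun j : Nat => ((j : Int), lst.getD j ""))).foldl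
        (fun d p => d.modify (PySem.Str.slice p.2 (some (-k)) none) [] (fun js => js ++ [p.1]))
        PySem.Dict.empty
      = ((List.range lst.length).map (fun b : Nat =>
          (PySem.Str.slice (lst.getD b "") (some (-k)) none, (↑b : Int)))).foldl
        (fun d p => d.modify p.1 [] (fun js => js ++ [p.2])) PySem.Dict.empty
      from by rw [List.foldl_map, List.foldl_map]]
    rw [PySem.Dict.getD_foldl_modify_append]
    simp [List.filter_map, Function.comp_def, Int.ofNat_eq_natCast]
  rw [List.foldl_map]
  simp only [hb]
  have houter : ∀ (a : Nat) (res : List (Int × Int)),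
      (((List.range lst.length).filter (fun (b : Nat) =>
          PySem.Str.slice (lst.getD b "") (some (-k)) none
            == PySem.Str.slice (lst.getD a "") none (some k))).map
          (fun (b : Nat) => Int.ofNat b)).foldl
        (fun res j => if j != (↑a : Int) then res ++ [((↑a : Int), j)] else res) res
      = res ++ ((List.range lst.length).filter (fun (b : Nat) =>
            (!(Int.ofNat a == Int.ofNat b)) &&
            (PySem.Str.slice (lst.getD a "") none (some k)
              == PySem.Str.slice (lst.getD b "") (some (-k)) none))).map
          (fun (b : Nat) => (Int.ofNat a, Int.ofNat b)) := by
    intro a res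
    rw [List.foldl_map, PySem.List.foldl_append_if, List.filter_filter]
    simp only [Int.ofNat_eq_natCast]
    congr 1
    apply congrArg
    apply List.filter_congr
    intro b _
    have hswap : ∀ (x y : Int) (s t : String),
        ((y != x) && (t == s)) = ((!(x == y)) && (s == t)) := by
      intro x y s t
      rw [bne, Bool.beq_comm (a := y) (b := x), Bool.beq_comm (a := t) (b := s)]
    exact hswap _ _ _ _
  simp only [houter]
  rw [PySem.List.foldl_append_eq_flatMap]
  simp

theorem prefix_suffix_overlap_eq (lst : List String) (k : Int) :
    prefix_suffix_overlap lst k = prefix_suffix_overlap_alt lst k := by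
  rw [pso_a_eq, pso_b_eq]

-- ===== VERDICT (by name: the statement is the Claim_ definition above) =====
theorem prefix_suffix_overlap_spec : Claim_equal_prefix_suffix_overlap := by
  intro lst k _
  unfold Spec_prefix_suffix_overlap
  exact prefix_suffix_overlap_eq lst k
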